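-- pv_equiv track=rewrite | github.com/pgreddy97/ADMouse | analyzePV.py | getSingleCluster
-- ===== SOURCE A (Python) =====
-- def getSingleCluster(num, labelList, mergeList):
-- 	str = '<'
-- 	num = int(num)
--
-- 	if (int(mergeList[num][0])<0):
-- 		str=str+labelList[-int(mergeList[num][0])]+' '
-- 	else:
-- 		str=str+getSingleCluster(mergeList[num][0],labelList,mergeList)
--
-- 	if (int(mergeList[num][1])<0):
-- 		str=str+labelList[-int(mergeList[num][1])]+' '
-- 	else:
-- 		str=str+getSingleCluster(mergeList[num][1],labelList,mergeList)
--
-- 	str=str+'>'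
-- 	return str
-- ===== SOURCE B (Python) =====
-- def getSingleCluster(num, labelList, mergeList):
--     out = ''
--     stack = [('node', int(num))]
--     while stack:
--         kind, val = stack.pop()
--         if kind == 'tok':
--             out += val
--         else:
--             row = mergeList[val]
--             sides = []
--             for k in (0, 1):
--                 v = int(row[k])
--                 sides.append(('tok', labelList[-v] + ' ') if v < 0 else ('node', v))
--             stack.append(('tok', '>'))
--             stack.append(sides[1])
--             stack.append(sides[0])
--             stack.append(('tok', '<'))
--     return out
-- ===== Notes on version B (the rewrite author's own statement) =====
-- stated objective: alternative
-- what changed: Replaces A's direct recursion over the merge tree by an iterative explicit work stack of node/token items popped in a single while loop, concatenating emitted tokens into the output string.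
import Mathlib
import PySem

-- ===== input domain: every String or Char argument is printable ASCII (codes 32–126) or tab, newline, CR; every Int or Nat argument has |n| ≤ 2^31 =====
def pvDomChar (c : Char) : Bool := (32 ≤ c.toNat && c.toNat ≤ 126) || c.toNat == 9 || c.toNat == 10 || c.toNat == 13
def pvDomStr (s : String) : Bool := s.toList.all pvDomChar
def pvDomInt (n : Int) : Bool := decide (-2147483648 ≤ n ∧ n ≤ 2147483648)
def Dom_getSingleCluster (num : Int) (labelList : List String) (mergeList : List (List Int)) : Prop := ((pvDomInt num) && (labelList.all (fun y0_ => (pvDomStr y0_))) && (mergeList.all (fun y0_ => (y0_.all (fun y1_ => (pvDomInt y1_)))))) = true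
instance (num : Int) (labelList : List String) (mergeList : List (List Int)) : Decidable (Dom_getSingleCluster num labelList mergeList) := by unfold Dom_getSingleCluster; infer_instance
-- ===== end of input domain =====

-- B replaces A's direct recursion by an iterative explicit work stack of node/token items
-- (alternative decomposition, same cost); return value only, no arguments are mutated.


-- ===== PORT A =====
-- A's recursion, made total with a depth counter (a totality guard only: under
-- Pre_ every chain of recursive calls is shorter than mergeList.length + 1, so
-- the counter is never exhausted).  Indexing uses PySem.List.pyGetD, exact
-- under Pre_ (Python raises exactly outside it, and those inputs are excluded).
def pvGoA (labelList : List String) (mergeList : List (List Int)) : Nat → Int → String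
  | 0, _ => ""
  | f + 1, num =>
    let row := PySem.List.pyGetD mergeList num []
    let v0 := PySem.List.pyGetD row 0 0
    let s0 := if v0 < 0 then PySem.List.pyGetD labelList (-v0) "" ++ " "
              else pvGoA labelList mergeList f v0
    let v1 := PySem.List.pyGetD row 1 0
    let s1 := if v1 < 0 then PySem.List.pyGetD labelList (-v1) "" ++ " "
              else pvGoA labelList mergeList f v1
    "<" ++ s0 ++ s1 ++ ">"

def getSingleCluster (num : Int) (labelList : List String) (mergeList : List (List Int)) : String :=
  pvGoA labelList mergeList (mergeList.length + 1) num

-- ===== PORT B =====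
-- work-stack items: a node index still to expand, or a literal token to emit
inductive PVItem : Type
  | node : Int → PVItem
  | tok : String → PVItem
deriving DecidableEq, Repr

-- one side of a merge row: a label token for a negative entry, else a child node
def pvSide (labelList : List String) (v : Int) : PVItem :=
  if v < 0 then PVItem.tok (PySem.List.pyGetD labelList (-v) "" ++ " ") else PVItem.node v

-- the while loop of Source B: pop an item, emit a token or expand a node
-- (the step counter is a totality guard only; under Pre_ the loop finishes
-- within 3 ^ (mergeList.length + 2) iterations)
def pvRunB (labelList : List String) (mergeList : List (List Int)) : Nat → List PVItem → String → String
  | _, [], out => out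
  | 0, _ :: _, out => out
  | f + 1, PVItem.tok s :: rest, out => pvRunB labelList mergeList f rest (out ++ s)
  | f + 1, PVItem.node n :: rest, out =>
    let row := PySem.List.pyGetD mergeList n []
    pvRunB labelList mergeList f
      (PVItem.tok "<" :: pvSide labelList (PySem.List.pyGetD row 0 0) ::
        pvSide labelList (PySem.List.pyGetD row 1 0) :: PVItem.tok ">" :: rest) out

def getSingleCluster_alt (num : Int) (labelList : List String) (mergeList : List (List Int)) : String :=
  pvRunB labelList mergeList (3 ^ (mergeList.length + 2)) [PVItem.node num] ""

-- ===== PRECONDITION & SPEC =====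
-- pvSafe L M d n: node n is a valid (possibly negative, Python-wrapped) index,
-- its row has the two entries Python reads,
-- a negative entry names a valid label, and a non-negative entry names a node
-- that is itself safe within depth d.  This is exactly "every index A touches
-- is in range and the merge references reachable from n are well-founded";
-- since a repetition-free reference chain has at most M.length nodes, depth
-- M.length + 1 decides it (IndexError / infinite recursion are excluded).
def pvSafe (L : List String) (M : List (List Int)) : Nat → Int → Bool
  | 0, _ => false
  | d + 1, n => decide (-(M.length : Int) ≤ n ∧ n < (M.length : Int)) && decide (2 ≤ (PySem.List.pyGetD M n []).length) && (if PySem.List.pyGetD (PySem.List.pyGetD M n []) 0 0 < 0 then decide ((-(PySem.List.pyGetD (PySem.List.pyGetD M n []) 0 0)).toNat < L.length) else pvSafe L M d (PySem.List.pyGetD (PySem.List.pyGetD M n []) 0 0)) && (if PySem.List.pyGetD (PySem.List.pyGetD M n []) 1 0 < 0 then decide ((-(PySem.List.pyGetD (PySem.List.pyGetD M n []) 1 0)).toNat < L.length) else pvSafe L M d (PySem.List.pyGetD (PySem.List.pyGetD M n []) 1 0))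

-- Exactly the inputs on which the Python A returns normally: elsewhere it
-- raises (IndexError on an out-of-range node or label index, RecursionError
-- on a circular merge reference).
def Pre_getSingleCluster (num : Int) (labelList : List String) (mergeList : List (List Int)) : Prop :=
  pvSafe labelList mergeList (mergeList.length + 1) num = true

instance (num : Int) (labelList : List String) (mergeList : List (List Int)) : Decidable (Pre_getSingleCluster num labelList mergeList) := by
  unfold Pre_getSingleCluster; infer_instance

def pvWitness_getSingleCluster : Int × List String × List (List Int) :=
  (1, ["", "a", "b"], [[-1, -2], [0, -2]])

def Spec_getSingleCluster (num : Int) (labelList : List String) (mergeList : List (List Int)) (out : String) : Prop := out = getSingleCluster_alt num labelList mergeList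
instance (num : Int) (labelList : List String) (mergeList : List (List Int)) (out : String) : Decidable (Spec_getSingleCluster num labelList mergeList out) := by unfold Spec_getSingleCluster; infer_instance

-- ===== CLAIM (what is proved, stated in full; the proofs are below) =====
def Claim_equal_getSingleCluster : Prop := ∀ (num : Int) (labelList : List String) (mergeList : List (List Int)), Dom_getSingleCluster num labelList mergeList → Pre_getSingleCluster num labelList mergeList → Spec_getSingleCluster num labelList mergeList (getSingleCluster num labelList mergeList)

-- ===== LEMMAS AND PROOFS =====

lemma pvRunB_nil (labelList : List String) (mergeList : List (List Int)) (fuelN : Nat) (out : String) :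
    pvRunB labelList mergeList fuelN [] out = out := by
  cases fuelN <;> rfl

lemma pvRunB_tok (labelList : List String) (mergeList : List (List Int)) (fuelN : Nat)
    (s : String) (rest : List PVItem) (out : String) :
    pvRunB labelList mergeList (fuelN + 1) (PVItem.tok s :: rest) out
      = pvRunB labelList mergeList fuelN rest (out ++ s) := rfl

lemma pvRunB_node (labelList : List String) (mergeList : List (List Int)) (fuelN : Nat)
    (n : Int) (rest : List PVItem) (out : String) :
    pvRunB labelList mergeList (fuelN + 1) (PVItem.node n :: rest) out
      = pvRunB labelList mergeList fuelN
          (PVItem.tok "<" :: pvSide labelList (PySem.List.pyGetD (PySem.List.pyGetD mergeList n []) 0 0) ::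
            pvSide labelList (PySem.List.pyGetD (PySem.List.pyGetD mergeList n []) 1 0) :: PVItem.tok ">" :: rest) out := rfl

lemma pvGoA_succ (labelList : List String) (mergeList : List (List Int)) (f : Nat) (num : Int) :
    pvGoA labelList mergeList (f + 1) num
      = "<" ++ (if PySem.List.pyGetD (PySem.List.pyGetD mergeList num []) 0 0 < 0
                then PySem.List.pyGetD labelList (-(PySem.List.pyGetD (PySem.List.pyGetD mergeList num []) 0 0)) "" ++ " "
                else pvGoA labelList mergeList f (PySem.List.pyGetD (PySem.List.pyGetD mergeList num []) 0 0))
            ++ (if PySem.List.pyGetD (PySem.List.pyGetD mergeList num []) 1 0 < 0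
                then PySem.List.pyGetD labelList (-(PySem.List.pyGetD (PySem.List.pyGetD mergeList num []) 1 0)) "" ++ " "
                else pvGoA labelList mergeList f (PySem.List.pyGetD (PySem.List.pyGetD mergeList num []) 1 0))
            ++ ">" := rfl

lemma pvSafe_succ (L : List String) (M : List (List Int)) (d : Nat) (n : Int) :
    pvSafe L M (d + 1) n
      = (decide (-(M.length : Int) ≤ n ∧ n < (M.length : Int)) && decide (2 ≤ (PySem.List.pyGetD M n []).length)
          && (if PySem.List.pyGetD (PySem.List.pyGetD M n []) 0 0 < 0 then decide ((-(PySem.List.pyGetD (PySem.List.pyGetD M n []) 0 0)).toNat < L.length) else pvSafe L M d (PySem.List.pyGetD (PySem.List.pyGetD M n []) 0 0))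
          && (if PySem.List.pyGetD (PySem.List.pyGetD M n []) 1 0 < 0 then decide ((-(PySem.List.pyGetD (PySem.List.pyGetD M n []) 1 0)).toNat < L.length) else pvSafe L M d (PySem.List.pyGetD (PySem.List.pyGetD M n []) 1 0))) := rfl

-- unpack one level of pvSafe into usable hypotheses
lemma pvSafe_elim (L : List String) (M : List (List Int)) (d : Nat) (n : Int)
    (h : pvSafe L M (d + 1) n = true) :
    (¬ PySem.List.pyGetD (PySem.List.pyGetD M n []) 0 0 < 0 → pvSafe L M d (PySem.List.pyGetD (PySem.List.pyGetD M n []) 0 0) = true)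
      ∧ (¬ PySem.List.pyGetD (PySem.List.pyGetD M n []) 1 0 < 0 → pvSafe L M d (PySem.List.pyGetD (PySem.List.pyGetD M n []) 1 0) = true) := by
  rw [pvSafe_succ] at h
  simp only [Bool.and_eq_true, decide_eq_true_eq] at h
  obtain ⟨⟨⟨_h0, _h1⟩, h2⟩, h3⟩ := h
  refine ⟨?_, ?_⟩
  · intro c; rwa [if_neg c] at h2
  · intro c; rwa [if_neg c] at h3

-- A's value does not depend on the depth guard once the guard exceeds the safety depth
lemma pvGoA_stable (L : List String) (M : List (List Int))
    : ∀ d : Nat, ∀ n : Int, pvSafe L M d n = true →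
      ∀ m m' : Nat, d ≤ m → d ≤ m' → pvGoA L M m n = pvGoA L M m' n := by
  intro d
  induction d with
  | zero => intro n h; simp [pvSafe] at h
  | succ d ih =>
    intro n h m m' hm hm'
    obtain ⟨m, rfl⟩ : ∃ k, m = k + 1 := ⟨m - 1, by omega⟩
    obtain ⟨m', rfl⟩ : ∃ k, m' = k + 1 := ⟨m' - 1, by omega⟩
    obtain ⟨hs0, hs1⟩ := pvSafe_elim L M d n h
    rw [pvGoA_succ, pvGoA_succ]
    have k0 : (if PySem.List.pyGetD (PySem.List.pyGetD M n []) 0 0 < 0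
          then PySem.List.pyGetD L (-(PySem.List.pyGetD (PySem.List.pyGetD M n []) 0 0)) "" ++ " "
          else pvGoA L M m (PySem.List.pyGetD (PySem.List.pyGetD M n []) 0 0))
        = (if PySem.List.pyGetD (PySem.List.pyGetD M n []) 0 0 < 0
          then PySem.List.pyGetD L (-(PySem.List.pyGetD (PySem.List.pyGetD M n []) 0 0)) "" ++ " "
          else pvGoA L M m' (PySem.List.pyGetD (PySem.List.pyGetD M n []) 0 0)) := by
      by_cases c : PySem.List.pyGetD (PySem.List.pyGetD M n []) 0 0 < 0
      · rw [if_pos c, if_pos c]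
      · rw [if_neg c, if_neg c]; exact ih _ (hs0 c) m m' (by omega) (by omega)
    have k1 : (if PySem.List.pyGetD (PySem.List.pyGetD M n []) 1 0 < 0
          then PySem.List.pyGetD L (-(PySem.List.pyGetD (PySem.List.pyGetD M n []) 1 0)) "" ++ " "
          else pvGoA L M m (PySem.List.pyGetD (PySem.List.pyGetD M n []) 1 0))
        = (if PySem.List.pyGetD (PySem.List.pyGetD M n []) 1 0 < 0
          then PySem.List.pyGetD L (-(PySem.List.pyGetD (PySem.List.pyGetD M n []) 1 0)) "" ++ " "
          else pvGoA L M m' (PySem.List.pyGetD (PySem.List.pyGetD M n []) 1 0)) := by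
      by_cases c : PySem.List.pyGetD (PySem.List.pyGetD M n []) 1 0 < 0
      · rw [if_pos c, if_pos c]
      · rw [if_neg c, if_neg c]; exact ih _ (hs1 c) m m' (by omega) (by omega)
    rw [k0, k1]

-- the main invariant: expanding one node on the stack appends exactly A's string
lemma pvRunB_expand (L : List String) (M : List (List Int))
    : ∀ d : Nat, ∀ n : Int, pvSafe L M d n = true → d ≤ M.length + 1 →
      ∃ f : Nat, f ≤ 3 ^ (d + 1) ∧
        ∀ fuelN : Nat, ∀ rest : List PVItem, ∀ out : String,
          pvRunB L M (fuelN + f) (PVItem.node n :: rest) out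
            = pvRunB L M fuelN rest (out ++ pvGoA L M (M.length + 1) n) := by
  intro d
  induction d with
  | zero => intro n h; simp [pvSafe] at h
  | succ d ih =>
    intro n h hd
    obtain ⟨hs0, hs1⟩ := pvSafe_elim L M d n h
    have side : ∀ v : Int, (¬ v < 0 → pvSafe L M d v = true) →
        ∃ c : Nat, c ≤ 3 ^ (d + 1) ∧
          ∀ fuelN : Nat, ∀ rest : List PVItem, ∀ out : String,
            pvRunB L M (fuelN + c) (pvSide L v :: rest) out
              = pvRunB L M fuelN rest
                  (out ++ (if v < 0 then PySem.List.pyGetD L (-v) "" ++ " "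
                           else pvGoA L M (M.length + 1) v)) := by
      intro v hv
      by_cases hvneg : v < 0
      · refine ⟨1, Nat.one_le_pow _ _ (by norm_num), ?_⟩
        intro fuelN rest out
        simp only [pvSide, if_pos hvneg]
        exact pvRunB_tok L M fuelN _ rest out
      · obtain ⟨c, hc, hrun⟩ := ih v (hv hvneg) (by omega)
        refine ⟨c, le_trans hc (Nat.pow_le_pow_right (by norm_num) (by omega)), ?_⟩
        intro fuelN rest out
        simp only [pvSide, if_neg hvneg]
        exact hrun fuelN rest out
    obtain ⟨c0, hc0, r0⟩ := side _ hs0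
    obtain ⟨c1, hc1, r1⟩ := side _ hs1
    have h3 : 3 ≤ 3 ^ (d + 1) := by
      calc 3 = 3 ^ 1 := rfl
        _ ≤ 3 ^ (d + 1) := Nat.pow_le_pow_right (by norm_num) (by omega)
    have hpow : 3 ^ (d + 2) = 3 ^ (d + 1) * 3 := pow_succ 3 (d + 1)
    refine ⟨c0 + c1 + 3, by omega, ?_⟩
    intro fuelN rest out
    have a1 : fuelN + (c0 + c1 + 3) = (fuelN + (c0 + c1 + 2)) + 1 := by omega
    rw [a1, pvRunB_node]
    have a2 : fuelN + (c0 + c1 + 2) = (fuelN + (c0 + c1 + 1)) + 1 := by omega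
    rw [a2, pvRunB_tok]
    have a3 : fuelN + (c0 + c1 + 1) = ((fuelN + c1 + 1) + c0) := by omega
    rw [a3, r0]
    have a4 : fuelN + c1 + 1 = ((fuelN + 1) + c1) := by omega
    rw [a4, r1, pvRunB_tok]
    have hstr : out ++ "<"
          ++ (if PySem.List.pyGetD (PySem.List.pyGetD M n []) 0 0 < 0
              then PySem.List.pyGetD L (-(PySem.List.pyGetD (PySem.List.pyGetD M n []) 0 0)) "" ++ " "
              else pvGoA L M (M.length + 1) (PySem.List.pyGetD (PySem.List.pyGetD M n []) 0 0))
          ++ (if PySem.List.pyGetD (PySem.List.pyGetD M n []) 1 0 < 0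
              then PySem.List.pyGetD L (-(PySem.List.pyGetD (PySem.List.pyGetD M n []) 1 0)) "" ++ " "
              else pvGoA L M (M.length + 1) (PySem.List.pyGetD (PySem.List.pyGetD M n []) 1 0))
          ++ ">"
        = out ++ pvGoA L M (M.length + 1) n := by
      conv_rhs => rw [pvGoA_succ]
      have s0 : (if PySem.List.pyGetD (PySem.List.pyGetD M n []) 0 0 < 0
            then PySem.List.pyGetD L (-(PySem.List.pyGetD (PySem.List.pyGetD M n []) 0 0)) "" ++ " "
            else pvGoA L M M.length (PySem.List.pyGetD (PySem.List.pyGetD M n []) 0 0))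
          = (if PySem.List.pyGetD (PySem.List.pyGetD M n []) 0 0 < 0
            then PySem.List.pyGetD L (-(PySem.List.pyGetD (PySem.List.pyGetD M n []) 0 0)) "" ++ " "
            else pvGoA L M (M.length + 1) (PySem.List.pyGetD (PySem.List.pyGetD M n []) 0 0)) := by
        by_cases c : PySem.List.pyGetD (PySem.List.pyGetD M n []) 0 0 < 0
        · rw [if_pos c, if_pos c]
        · rw [if_neg c, if_neg c]
          exact pvGoA_stable L M d _ (hs0 c) M.length (M.length + 1) (by omega) (by omega)
      have s1 : (if PySem.List.pyGetD (PySem.List.pyGetD M n []) 1 0 < 0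
            then PySem.List.pyGetD L (-(PySem.List.pyGetD (PySem.List.pyGetD M n []) 1 0)) "" ++ " "
            else pvGoA L M M.length (PySem.List.pyGetD (PySem.List.pyGetD M n []) 1 0))
          = (if PySem.List.pyGetD (PySem.List.pyGetD M n []) 1 0 < 0
            then PySem.List.pyGetD L (-(PySem.List.pyGetD (PySem.List.pyGetD M n []) 1 0)) "" ++ " "
            else pvGoA L M (M.length + 1) (PySem.List.pyGetD (PySem.List.pyGetD M n []) 1 0)) := by
        by_cases c : PySem.List.pyGetD (PySem.List.pyGetD M n []) 1 0 < 0
        · rw [if_pos c, if_pos c]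
        · rw [if_neg c, if_neg c]
          exact pvGoA_stable L M d _ (hs1 c) M.length (M.length + 1) (by omega) (by omega)
      rw [s0, s1]
      simp [String.append_assoc]
    rw [hstr]

-- ===== VERDICT (by name: the statement is the Claim_ definition above) =====
theorem getSingleCluster_spec : Claim_equal_getSingleCluster := by
  intro num labelList mergeList _ hpre
  unfold Spec_getSingleCluster
  obtain ⟨f, hf, hrun⟩ :=
    pvRunB_expand labelList mergeList (mergeList.length + 1) num hpre (le_refl _)
  have hfle : f ≤ 3 ^ (mergeList.length + 2) := hf
  have hsplit : 3 ^ (mergeList.length + 2) = (3 ^ (mergeList.length + 2) - f) + f := by omega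
  show pvGoA labelList mergeList (mergeList.length + 1) num = _
  unfold getSingleCluster_alt
  rw [hsplit, hrun, pvRunB_nil, String.empty_append]
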